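-- pv_equiv track=rewrite | github.com/DgtalCode/Double_D | OpenMV/marks.py | normalise_corners
-- ===== SOURCE A (Python) =====
-- def sort_key(val):
--     return val[0]
--
-- def normalise_corners(corners):
--     n_corn = []
--
--     #find min x,y
--     for i in (0,1):
--         a = corners[0]
--         for c in corners:
--             if c[i] < a[i]: a = c
--         n_corn.append(a)
--
--     #find max x,y
--     for i in (0,1):
--         a = corners[0]
--         for c in corners:
--             if c[i] > a[i]: a = c
--         n_corn.append(a)
--
--     n_corn.sort(key=sort_key)
--
--     if n_corn[0][0] > n_corn[1][0]:
--         n_corn[0][0], n_corn[1][0] = n_corn[1][0], n_corn[0][0]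
--     if n_corn[2][0] > n_corn[3][0]:
--         n_corn[2][0], n_corn[3][0] = n_corn[3][0], n_corn[2][0]
--
--     return n_corn
-- ===== SOURCE B (Python) =====
-- def normalise_corners(corners):
--     minx = miny = maxx = maxy = corners[0]
--     for c in corners:
--         if c[0] < minx[0]: minx = c
--         if c[1] < miny[1]: miny = c
--         if c[0] > maxx[0]: maxx = c
--         if c[1] > maxy[1]: maxy = c
--     n_corn = [minx, miny, maxx, maxy]
--     n_corn.sort(key=lambda v: v[0])
--     return n_corn
-- ===== Notes on version B (the rewrite author's own statement) =====
-- stated objective: simpler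
-- what changed: Replaces A's four separate full scans plus two dead post-sort swap branches by a single pass maintaining all four extreme corners at once, then one stable sort by x.
import Mathlib
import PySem

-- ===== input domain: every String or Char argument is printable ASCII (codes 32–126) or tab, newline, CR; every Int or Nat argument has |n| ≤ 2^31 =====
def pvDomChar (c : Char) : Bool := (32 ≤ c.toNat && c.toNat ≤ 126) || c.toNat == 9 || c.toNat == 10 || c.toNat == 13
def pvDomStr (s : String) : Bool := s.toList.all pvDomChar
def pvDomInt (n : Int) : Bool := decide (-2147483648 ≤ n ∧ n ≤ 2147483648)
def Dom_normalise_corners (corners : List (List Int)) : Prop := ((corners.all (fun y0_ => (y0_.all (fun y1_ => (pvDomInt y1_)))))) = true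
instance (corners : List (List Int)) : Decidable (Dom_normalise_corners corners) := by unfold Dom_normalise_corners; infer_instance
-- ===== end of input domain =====

-- B replaces A's four separate full scans and two dead post-sort swap branches by one
-- pass maintaining all four extreme corners at once, then one stable sort by x (simpler).


-- ===== PORT A =====
def sort_key (val : List Int) : Int := val.getD 0 0

-- inner 'for c in corners: if c[i] < a[i]: a = c' with a = corners[0]
def nc_minScan (corners : List (List Int)) (i : Nat) : List Int :=
  corners.foldl (fun a c => if c.getD i 0 < a.getD i 0 then c else a) (corners.headD [])

-- inner 'for c in corners: if c[i] > a[i]: a = c' with a = corners[0]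
def nc_maxScan (corners : List (List Int)) (i : Nat) : List Int :=
  corners.foldl (fun a c => if c.getD i 0 > a.getD i 0 then c else a) (corners.headD [])

-- 'if n_corn[i][0] > n_corn[j][0]: n_corn[i][0], n_corn[j][0] = n_corn[j][0], n_corn[i][0]'
def nc_swapx (s : List (List Int)) (i j : Nat) : List (List Int) :=
  if (s.getD i []).getD 0 0 > (s.getD j []).getD 0 0 then
    (s.set i ((s.getD i []).set 0 ((s.getD j []).getD 0 0))).set j
      ((s.getD j []).set 0 ((s.getD i []).getD 0 0))
  else s

def normalise_corners (corners : List (List Int)) : List (List Int) :=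
  let n_corn := [nc_minScan corners 0, nc_minScan corners 1,
                 nc_maxScan corners 0, nc_maxScan corners 1]
  let s := PySem.List.sorted n_corn sort_key false
  nc_swapx (nc_swapx s 0 1) 2 3

-- ===== PORT B =====
-- one step of B's single loop, updating (minx, miny, maxx, maxy)
def nc_step (st : List Int × List Int × List Int × List Int) (c : List Int) :
    List Int × List Int × List Int × List Int :=
  let mnx := if c.getD 0 0 < st.1.getD 0 0 then c else st.1
  let mny := if c.getD 1 0 < st.2.1.getD 1 0 then c else st.2.1
  let mxx := if c.getD 0 0 > st.2.2.1.getD 0 0 then c else st.2.2.1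
  let mxy := if c.getD 1 0 > st.2.2.2.getD 1 0 then c else st.2.2.2
  (mnx, mny, mxx, mxy)

def normalise_corners_alt (corners : List (List Int)) : List (List Int) :=
  match corners with
  | [] => []  -- B raises IndexError on corners[0]; excluded by Pre_
  | c0 :: _ =>
    let st := corners.foldl nc_step (c0, c0, c0, c0)
    PySem.List.sorted [st.1, st.2.1, st.2.2.1, st.2.2.2] (fun v => v.getD 0 0) false

-- ===== PRECONDITION & SPEC =====
-- Pre_ = exactly where Python A returns: corners[0] needs a nonempty list and
-- c[1] needs every corner to have at least two coordinates (else IndexError).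
def Pre_normalise_corners (corners : List (List Int)) : Prop :=
  corners ≠ [] ∧ ∀ c ∈ corners, 2 ≤ c.length
instance (corners : List (List Int)) : Decidable (Pre_normalise_corners corners) := by
  unfold Pre_normalise_corners; infer_instance

def pvWitness_normalise_corners : List (List Int) := [[1, 5], [3, 0], [2, 2]]

def Spec_normalise_corners (corners : List (List Int)) (out : List (List Int)) : Prop :=
  out = normalise_corners_alt corners
instance (corners : List (List Int)) (out : List (List Int)) :
    Decidable (Spec_normalise_corners corners out) := by
  unfold Spec_normalise_corners; infer_instance

-- ===== CLAIM (what is proved, stated in full; the proofs are below) =====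
def Claim_equal_normalise_corners : Prop :=
  ∀ (corners : List (List Int)), Dom_normalise_corners corners →
    Pre_normalise_corners corners →
    Spec_normalise_corners corners (normalise_corners corners)

-- ===== LEMMAS AND PROOFS =====

-- B's one fold over a 4-tuple equals A's four independent scans
lemma nc_fold4 (corners : List (List Int)) (a b c d : List Int) :
    corners.foldl nc_step (a, b, c, d) =
      (corners.foldl (fun a c => if c.getD 0 0 < a.getD 0 0 then c else a) a,
       corners.foldl (fun a c => if c.getD 1 0 < a.getD 1 0 then c else a) b,
       corners.foldl (fun a c => if c.getD 0 0 > a.getD 0 0 then c else a) c,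
       corners.foldl (fun a c => if c.getD 1 0 > a.getD 1 0 then c else a) d) := by
  induction corners generalizing a b c d with
  | nil => rfl
  | cons x xs ih => simp only [List.foldl_cons, nc_step, ih]

-- the two post-sort swap branches of A never fire: the list is sorted by x
lemma nc_swaps_id (n : List (List Int)) (h : n.length = 4) :
    nc_swapx (nc_swapx (PySem.List.sorted n sort_key false) 0 1) 2 3 =
      PySem.List.sorted n sort_key false := by
  have hp := PySem.List.sorted_pairwise (xs := n) (key := sort_key)
  have hl : (PySem.List.sorted n sort_key false).length = 4 := by
    rw [PySem.List.length_sorted, h]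
  generalize hq : PySem.List.sorted n sort_key false = s at hp hl ⊢
  have hex : ∃ a b c d, s = [a, b, c, d] := by
    rcases s with _ | ⟨a, _ | ⟨b, _ | ⟨c, _ | ⟨d, _ | ⟨e, t⟩⟩⟩⟩⟩ <;> simp_all
  obtain ⟨a, b, c, d, rfl⟩ := hex
  simp only [List.pairwise_cons] at hp
  have h01 : sort_key a ≤ sort_key b := hp.1 b (by simp)
  have h23 : sort_key c ≤ sort_key d := hp.2.2.1 d (by simp)
  simp only [sort_key, List.getD_eq_getElem?_getD] at h01 h23
  have h01' := not_lt.mpr h01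
  have h23' := not_lt.mpr h23
  simp [nc_swapx, List.getD_eq_getElem?_getD, h01', h23']

-- ===== VERDICT (by name: the statement is the Claim_ definition above) =====
theorem normalise_corners_spec : Claim_equal_normalise_corners := by
  intro corners _ hpre
  unfold Spec_normalise_corners
  obtain ⟨hne, -⟩ := hpre
  cases corners with
  | nil => exact absurd rfl hne
  | cons c0 rest =>
    have hb : normalise_corners_alt (c0 :: rest) =
        PySem.List.sorted
          [nc_minScan (c0 :: rest) 0, nc_minScan (c0 :: rest) 1,
           nc_maxScan (c0 :: rest) 0, nc_maxScan (c0 :: rest) 1]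
          (fun v => v.getD 0 0) false := by
      simp only [normalise_corners_alt, nc_fold4, nc_minScan, nc_maxScan, List.headD_cons]
    have hk : (fun v : List Int => v.getD 0 0) = sort_key := by
      funext v; rfl
    rw [hb, hk]
    exact nc_swaps_id _ rfl
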